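-- pv_equiv track=rewrite | github.com/vabhijeet0209/stocksignals | alpha_evaluation.py | cross_section_ranking
-- ===== SOURCE A (Python) =====
-- def cross_section_ranking(map_today):
--   count_total = 0
--   last_val = 0
--   last_key = ""
--   for key, value in sorted(map_today.items(), key=lambda item: item[1]):
--     if count_total == 0:
--       map_today[key] = count_total
--       last_val = value
--       last_key = key
--       count_total = count_total + 1
--       continue
--     else :
--       if last_val == value:
--         map_today[key] = map_today[last_key]
--         count_total = count_total + 1
--         last_val = value
--         last_key = key
--       else :
--         map_today[key] = count_total
--         count_total = count_total + 1
--         last_val = value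
--         last_key = key
--   return map_today
-- ===== SOURCE B (Python) =====
-- def cross_section_ranking(map_today):
--   vals = list(map_today.values())
--   for key, value in list(map_today.items()):
--     map_today[key] = sum(1 for v in vals if v < value)
--   return map_today
-- ===== Notes on version B (the rewrite author's own statement) =====
-- stated objective: simpler
-- what changed: Replaced the sort-then-sequential-pass (tracking last key/value to share tie ranks) by direct counting: each key's rank is the number of strictly smaller values in the dict.
import Mathlib
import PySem

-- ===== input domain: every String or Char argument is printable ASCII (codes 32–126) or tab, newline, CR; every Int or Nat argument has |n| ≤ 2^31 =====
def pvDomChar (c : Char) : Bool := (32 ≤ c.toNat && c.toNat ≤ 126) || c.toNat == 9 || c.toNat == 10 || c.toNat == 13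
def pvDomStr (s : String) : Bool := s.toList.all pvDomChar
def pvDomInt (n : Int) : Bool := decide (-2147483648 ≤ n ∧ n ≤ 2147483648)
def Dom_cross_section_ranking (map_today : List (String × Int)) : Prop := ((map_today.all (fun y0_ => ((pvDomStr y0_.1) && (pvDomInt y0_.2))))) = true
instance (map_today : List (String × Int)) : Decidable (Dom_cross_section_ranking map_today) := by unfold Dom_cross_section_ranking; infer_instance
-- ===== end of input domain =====

-- B drops the sort and gives each key the count of strictly smaller values, so ties share a rank
-- automatically; both Pythons mutate map_today in place identically, and the theorem is about the
-- returned dict.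

-- ===== PORT A =====
-- the dict argument arrives as its association list; like the Python, A works on the dict built from it
def cross_section_ranking (map_today : List (String × Int)) : List (String × Int) :=
  let d0 : PySem.Dict String Int := PySem.Dict.ofList map_today
  (((PySem.List.sorted d0.items (fun item => item.2) false).foldl
    (fun (st : PySem.Dict String Int × Int × Int × String) kv =>
      let d := st.1; let count_total := st.2.1; let last_val := st.2.2.1; let last_key := st.2.2.2
      if count_total = 0 then
        (d.insert kv.1 0, count_total + 1, kv.2, kv.1)
      else if last_val = kv.2 then
        -- map_today[last_key]: last_key is always a present key here, so getD's default is never used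
        (d.insert kv.1 (d.getD last_key 0), count_total + 1, kv.2, kv.1)
      else
        (d.insert kv.1 count_total, count_total + 1, kv.2, kv.1))
    (d0, 0, 0, ""))).1.items

-- ===== PORT B =====
def cross_section_ranking_alt (map_today : List (String × Int)) : List (String × Int) :=
  let d0 : PySem.Dict String Int := PySem.Dict.ofList map_today
  let vals := d0.values
  (d0.items.foldl
    (fun d kv => d.insert kv.1 ((vals.countP (fun v => v < kv.2) : Nat) : Int)) d0).items

-- ===== PRECONDITION & SPEC =====
def Spec_cross_section_ranking (map_today : List (String × Int)) (out : List (String × Int)) : Prop := out = cross_section_ranking_alt map_today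
instance (map_today : List (String × Int)) (out : List (String × Int)) : Decidable (Spec_cross_section_ranking map_today out) := by unfold Spec_cross_section_ranking; infer_instance

-- ===== CLAIM (what is proved, stated in full; the proofs are below) =====
def Claim_equal_cross_section_ranking : Prop := ∀ (map_today : List (String × Int)), Dom_cross_section_ranking map_today → Spec_cross_section_ranking map_today (cross_section_ranking map_today)

-- ===== LEMMAS AND PROOFS =====

-- the rank both programs assign to value v: the number of strictly smaller values
def pvRank (vals : List Int) (v : Int) : Int := (vals.countP (fun x => x < v) : Int)

-- A's loop body, named for the proofs (definitionally the lambda in the port of A)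
def csrStep (st : PySem.Dict String Int × Int × Int × String) (kv : String × Int) :
    PySem.Dict String Int × Int × Int × String :=
  let d := st.1; let count_total := st.2.1; let last_val := st.2.2.1; let last_key := st.2.2.2
  if count_total = 0 then
    (d.insert kv.1 0, count_total + 1, kv.2, kv.1)
  else if last_val = kv.2 then
    (d.insert kv.1 (d.getD last_key 0), count_total + 1, kv.2, kv.1)
  else
    (d.insert kv.1 count_total, count_total + 1, kv.2, kv.1)

-- a fold of inserts at keys all different from k leaves k's binding alone
theorem csr_getD_foldl_of_ne (g : String × Int → Int) :
    ∀ (rest : List (String × Int)) (d' : PySem.Dict String Int) (k : String),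
      (∀ q ∈ rest, q.1 ≠ k) →
      (rest.foldl (fun d kv => d.insert kv.1 (g kv)) d').getD k 0 = d'.getD k 0 := by
  intro rest
  induction rest with
  | nil => intro d' k _; simp
  | cons y r ihr =>
    intro d' k hne
    simp only [List.foldl_cons]
    rw [ihr _ _ (fun q hq => hne q (by simp [hq]))]
    exact PySem.Dict.getD_insert_of_ne _ _ _ (Ne.symm (hne y (by simp)))

-- B loop characterisation
theorem csr_B_loop (d0 : PySem.Dict String Int) (g : String × Int → Int) :
    ∀ (ps : List (String × Int)) (d : PySem.Dict String Int),
      d.keys = d0.keys → (∀ p ∈ ps, p.1 ∈ d0.keys) → (ps.map (·.1)).Nodup →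
      ((ps.foldl (fun d kv => d.insert kv.1 (g kv)) d).keys = d0.keys ∧
       (∀ p ∈ ps, (ps.foldl (fun d kv => d.insert kv.1 (g kv)) d).getD p.1 0 = g p)) := by
  intro ps
  induction ps with
  | nil => intro d hk _ _; exact ⟨hk, by simp⟩
  | cons x t ih =>
    intro d hk hsub hnd
    simp only [List.map_cons, List.nodup_cons, List.mem_map] at hnd
    have hxk : x.1 ∈ d.keys := hk ▸ hsub x (by simp)
    have hcont : d.contains x.1 = true := (PySem.Dict.contains_iff_mem_keys d x.1).mpr hxk
    have hk' : (d.insert x.1 (g x)).keys = d0.keys := by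
      rw [PySem.Dict.keys_insert_of_contains d (g x) hcont, hk]
    obtain ⟨hkeys, hvals⟩ := ih (d.insert x.1 (g x)) hk'
      (fun p hp => hsub p (by simp [hp])) hnd.2
    refine ⟨hkeys, ?_⟩
    intro p hp
    rcases List.mem_cons.mp hp with rfl | hp'
    · simp only [List.foldl_cons]
      rw [csr_getD_foldl_of_ne g t _ _ (fun q hq h => hnd.1 ⟨q, hq, h⟩)]
      exact PySem.Dict.getD_insert_self _ _ _ _
    · exact hvals p hp'

theorem csr_A_loop (d0 : PySem.Dict String Int) (vals : List Int) :
    ∀ (rest done : List (String × Int)) (d : PySem.Dict String Int) (lv : Int) (lk : String),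
      (done ++ rest).Pairwise (fun a b => a.2 ≤ b.2) →
      ((done ++ rest).map (·.1)).Nodup →
      (∀ p ∈ done ++ rest, p.1 ∈ d0.keys) →
      vals.Perm ((done ++ rest).map (·.2)) →
      done.getLast? = some (lk, lv) →
      (∀ a ∈ done, a.2 ≤ lv) →
      d.keys = d0.keys →
      (∀ p ∈ done, d.getD p.1 0 = pvRank vals p.2) →
      ((rest.foldl csrStep (d, (done.length : Int), lv, lk)).1.keys = d0.keys ∧
       (∀ p ∈ done ++ rest,
        (rest.foldl csrStep (d, (done.length : Int), lv, lk)).1.getD p.1 0 = pvRank vals p.2)) := by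
  intro rest
  induction rest with
  | nil =>
    intro done d lv lk _ _ _ _ _ _ hk hvals
    exact ⟨hk, by simpa using hvals⟩
  | cons x r ih =>
    intro done d lv lk hpair hnd hsub hperm hlast hmax hk hvals
    have hdone_ne : done ≠ [] := by
      intro h; rw [h] at hlast; simp at hlast
    have hct0 : ((done.length : Int)) ≠ 0 := by
      simp [List.length_eq_zero_iff, hdone_ne]
    have hlkmem : (lk, lv) ∈ done := List.mem_of_getLast? hlast
    have hdisj : ∀ a ∈ done, a.1 ≠ x.1 := by
      have h2 := hnd
      rw [List.map_append] at h2
      have h3 := List.disjoint_of_nodup_append h2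
      intro a ha h
      exact h3 (List.mem_map_of_mem ha) (h ▸ by simp)
    have hpair' := hpair
    rw [List.pairwise_append] at hpair'
    have hle : lv ≤ x.2 := hpair'.2.2 (lk, lv) hlkmem x (by simp)
    have hrest_ge : ∀ b ∈ x :: r, x.2 ≤ b.2 := by
      intro b hb
      rcases List.mem_cons.mp hb with rfl | hb'
      · exact le_refl _
      · exact (List.pairwise_cons.mp hpair'.2.1).1 b hb'
    have hstep : csrStep (d, (done.length : Int), lv, lk) x =
        (d.insert x.1 (pvRank vals x.2), ((done ++ [x]).length : Int), x.2, x.1) := by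
      show (if (done.length : Int) = 0 then _ else if lv = x.2 then _ else _) = _
      rw [if_neg hct0]
      by_cases htie : lv = x.2
      · rw [if_pos htie]
        have hv : d.getD lk 0 = pvRank vals x.2 := by
          rw [hvals (lk, lv) hlkmem]; exact congrArg (pvRank vals) htie
        simp [hv, List.length_append]
      · rw [if_neg htie]
        have hlt : lv < x.2 := lt_of_le_of_ne hle htie
        have hcnt : pvRank vals x.2 = (done.length : Int) := by
          have hc := hperm.countP_eq (fun v => decide (v < x.2))
          have hdonec : (done.map (·.2)).countP (fun v => decide (v < x.2)) = done.length := by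
            rw [List.countP_eq_length.mpr, List.length_map]
            intro v hv
            obtain ⟨a, ha, rfl⟩ := List.mem_map.mp hv
            exact decide_eq_true (lt_of_le_of_lt (hmax a ha) hlt)
          have hrestc : (((x :: r).map (·.2)).countP (fun v => decide (v < x.2))) = 0 := by
            rw [List.countP_eq_zero.mpr]
            intro v hv
            obtain ⟨b, hb, rfl⟩ := List.mem_map.mp hv
            simpa using not_lt.mpr (hrest_ge b hb)
          unfold pvRank
          rw [hc, List.map_append, List.countP_append, hdonec, hrestc]
          simp
        simp [hcnt, List.length_append]
    have hkx : x.1 ∈ d.keys := hk ▸ hsub x (by simp)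
    have hcont : d.contains x.1 = true := (PySem.Dict.contains_iff_mem_keys d x.1).mpr hkx
    have ihr := ih (done ++ [x]) (d.insert x.1 (pvRank vals x.2)) x.2 x.1
      (by simpa using hpair)
      (by simpa using hnd)
      (by intro p hp; exact hsub p (by simpa using hp))
      (by simpa using hperm)
      (List.getLast?_concat)
      (by
        intro a ha
        rcases List.mem_append.mp ha with h1 | h2
        · exact hpair'.2.2 a h1 x (by simp)
        · simp at h2; rw [h2])
      (by rw [PySem.Dict.keys_insert_of_contains d (pvRank vals x.2) hcont, hk])
      (by
        intro p hp
        rcases List.mem_append.mp hp with h1 | h2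
        · rw [PySem.Dict.getD_insert_of_ne _ _ _ (hdisj p h1)]
          exact hvals p h1
        · simp at h2; rw [h2]
          exact PySem.Dict.getD_insert_self _ _ _ _)
    rw [List.foldl_cons, hstep]
    refine ⟨ihr.1, ?_⟩
    intro p hp
    have hp' : p ∈ (done ++ [x]) ++ r := by simpa using hp
    exact ihr.2 p hp'

theorem csr_main (m : List (String × Int)) : cross_section_ranking m = cross_section_ranking_alt m := by
  set d0 : PySem.Dict String Int := PySem.Dict.ofList m with hd0
  set s := PySem.List.sorted d0.items (fun item => item.2) false with hs
  have hnodk : d0.keys.Nodup := PySem.Dict.nodup_keys_ofList m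
  have hperm_s : s.Perm d0.items := PySem.List.sorted_perm _ _ _
  have hkeys_def : d0.keys = d0.items.map (·.1) := rfl
  have hnds : (s.map (·.1)).Nodup := by
    rw [(hperm_s.map (·.1)).nodup_iff]
    exact hkeys_def ▸ hnodk
  have hpair : s.Pairwise (fun a b => a.2 ≤ b.2) := PySem.List.sorted_pairwise _ _
  have hvals_def : d0.values = d0.items.map (·.2) := rfl
  have hpermv : (d0.values).Perm (s.map (·.2)) := by
    rw [hvals_def]; exact (hperm_s.map (·.2)).symm
  have hsub : ∀ p ∈ s, p.1 ∈ d0.keys := by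
    intro p hp
    exact hkeys_def ▸ List.mem_map_of_mem (hperm_s.mem_iff.mp hp)
  -- A's loop result
  have hA : ((s.foldl csrStep (d0, 0, 0, "")).1.keys = d0.keys ∧
      ∀ p ∈ d0.items, (s.foldl csrStep (d0, 0, 0, "")).1.getD p.1 0 = pvRank d0.values p.2) := by
    cases hsc : s with
    | nil =>
      refine ⟨rfl, ?_⟩
      have : d0.items = [] := by
        have := hperm_s
        rw [hsc] at this
        exact (this.nil_eq).symm
      rw [this]; intro p hp; simp at hp
    | cons q t =>
      rw [hsc] at hpair hnds hsub hpermv hperm_s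
      have hq0 : pvRank d0.values q.2 = 0 := by
        unfold pvRank
        rw [hpermv.countP_eq, List.countP_eq_zero.mpr]
        · rfl
        · intro v hv
          obtain ⟨b, hb, rfl⟩ := List.mem_map.mp hv
          have : q.2 ≤ b.2 := by
            rcases List.mem_cons.mp hb with rfl | hb'
            · exact le_refl _
            · exact (List.pairwise_cons.mp hpair).1 b hb'
          simpa using not_lt.mpr this
      have hq_keys : q.1 ∈ d0.keys := hsub q (by simp)
      have hq_cont : d0.contains q.1 = true := (PySem.Dict.contains_iff_mem_keys d0 q.1).mpr hq_keys
      have hstep0 : csrStep (d0, 0, 0, "") q = (d0.insert q.1 0, ((1 : Nat) : Int), q.2, q.1) := by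
        norm_num [csrStep]
      have hloop := csr_A_loop d0 d0.values t [q] (d0.insert q.1 0) q.2 q.1
        (by simpa using hpair)
        (by simpa using hnds)
        (by simpa using hsub)
        (by simpa using hpermv)
        (by simp)
        (by intro a ha; simp at ha; rw [ha])
        (by rw [PySem.Dict.keys_insert_of_contains d0 0 hq_cont])
        (by intro p hp; simp at hp; rw [hp]
            rw [PySem.Dict.getD_insert_self, hq0])
      rw [List.foldl_cons, hstep0]
      have hA1 : ([q] ++ t) = q :: t := by simp
      refine ⟨by simpa using hloop.1, ?_⟩
      intro p hp
      have hps : p ∈ [q] ++ t := by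
        simpa using hperm_s.symm.subset hp
      have := hloop.2 p hps
      simpa using this
  -- B's loop result
  have hB := csr_B_loop d0 (fun kv => ((d0.values.countP (fun v => v < kv.2) : Nat) : Int))
    d0.items d0 rfl (fun p hp => hkeys_def ▸ List.mem_map_of_mem hp) (hkeys_def ▸ hnodk)
  -- assemble
  show (s.foldl
      (fun (st : PySem.Dict String Int × Int × Int × String) kv =>
        let d := st.1; let count_total := st.2.1; let last_val := st.2.2.1; let last_key := st.2.2.2
        if count_total = 0 then
          (d.insert kv.1 0, count_total + 1, kv.2, kv.1)
        else if last_val = kv.2 then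
          (d.insert kv.1 (d.getD last_key 0), count_total + 1, kv.2, kv.1)
        else
          (d.insert kv.1 count_total, count_total + 1, kv.2, kv.1))
      (d0, 0, 0, "")).1.items =
    (d0.items.foldl
      (fun d kv => d.insert kv.1 ((d0.values.countP (fun v => v < kv.2) : Nat) : Int)) d0).items
  have hAfold : (s.foldl
      (fun (st : PySem.Dict String Int × Int × Int × String) kv =>
        let d := st.1; let count_total := st.2.1; let last_val := st.2.2.1; let last_key := st.2.2.2
        if count_total = 0 then
          (d.insert kv.1 0, count_total + 1, kv.2, kv.1)
        else if last_val = kv.2 then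
          (d.insert kv.1 (d.getD last_key 0), count_total + 1, kv.2, kv.1)
        else
          (d.insert kv.1 count_total, count_total + 1, kv.2, kv.1))
      (d0, 0, 0, "")) = s.foldl csrStep (d0, 0, 0, "") := rfl
  rw [hAfold]
  set dA := (s.foldl csrStep (d0, 0, 0, "")).1 with hdA
  set dB := d0.items.foldl
      (fun d kv => d.insert kv.1 ((d0.values.countP (fun v => v < kv.2) : Nat) : Int)) d0 with hdB
  have hkA : dA.keys.Nodup := hA.1 ▸ hnodk
  have hkB : dB.keys.Nodup := hB.1 ▸ hnodk
  rw [PySem.Dict.items_eq_map_keys dA hkA 0, PySem.Dict.items_eq_map_keys dB hkB 0, hA.1, hB.1]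
  apply List.map_congr_left
  intro k hk
  obtain ⟨p, hp, hpk⟩ := List.mem_map.mp (hkeys_def ▸ hk)
  have h1 := hA.2 p hp
  have h2 := hB.2 p hp
  rw [← hpk, h1, h2]
  rfl

-- ===== VERDICT (by name: the statement is the Claim_ definition above) =====
theorem cross_section_ranking_spec : Claim_equal_cross_section_ranking := by
  intro map_today _
  show cross_section_ranking map_today = cross_section_ranking_alt map_today
  exact csr_main map_today
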